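-- pv_equiv track=rewrite | github.com/epam/badgerdoc | search/search/harvester.py | max_bbox
-- ===== SOURCE A (Python) =====
-- def max_bbox(bboxes):
--     (minx,miny,maxx,maxy) = (bboxes[0][0],bboxes[0][1], bboxes[0][2], bboxes[0][3])
--     for bbox in  bboxes[1:]:
--         minx = min(minx,bbox[0] )
--         miny = min(miny, bbox[1])
--         maxx = max(maxx,bbox[2])
--         maxy = max(maxy, bbox[3])
--
--     return [minx,miny-50,maxx,maxy-50]
-- ===== SOURCE B (Python) =====
-- def max_bbox(bboxes):
--     minx = min(b[0] for b in bboxes)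
--     miny = min(b[1] for b in bboxes)
--     maxx = max(b[2] for b in bboxes)
--     maxy = max(b[3] for b in bboxes)
--     return [minx, miny - 50, maxx, maxy - 50]
-- ===== Notes on version B (the rewrite author's own statement) =====
-- stated objective: simpler
-- what changed: Replaces the fused single loop carrying four accumulators (seeded from bboxes[0] and iterating over bboxes[1:]) by four independent column reductions, one builtin min/max over a generator per coordinate.
import Mathlib
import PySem

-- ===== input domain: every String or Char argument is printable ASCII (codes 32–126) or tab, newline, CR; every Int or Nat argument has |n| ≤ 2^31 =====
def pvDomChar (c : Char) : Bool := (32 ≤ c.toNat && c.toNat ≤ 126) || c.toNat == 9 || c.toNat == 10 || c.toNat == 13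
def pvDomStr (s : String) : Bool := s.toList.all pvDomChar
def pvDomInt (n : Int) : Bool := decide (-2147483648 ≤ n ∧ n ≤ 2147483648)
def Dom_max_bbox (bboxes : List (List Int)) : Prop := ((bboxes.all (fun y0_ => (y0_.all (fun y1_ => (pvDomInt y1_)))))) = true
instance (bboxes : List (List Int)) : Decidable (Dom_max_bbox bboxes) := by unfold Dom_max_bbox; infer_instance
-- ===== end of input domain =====

-- B replaces A's fused single loop over four accumulators by four independent column reductions (one min/max per coordinate); objective: simpler.


-- shared indexing helper: bbox[i], total with junk default 0 (Pre_ excludes the none case)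
def pyIdx (xs : List Int) (i : Int) : Int := (PySem.List.pyGet? xs i).getD 0

-- ===== PORT A =====
-- literal transliteration: seed the four accumulators from bboxes[0], fold over bboxes[1:]
def max_bbox (bboxes : List (List Int)) : List Int :=
  let b0 : List Int := (PySem.List.pyGet? bboxes 0).getD []
  let r := (PySem.List.slice bboxes (some 1) none).foldl
    (fun (s : Int × Int × Int × Int) bbox =>
      (min s.1 (pyIdx bbox 0), min s.2.1 (pyIdx bbox 1),
       max s.2.2.1 (pyIdx bbox 2), max s.2.2.2 (pyIdx bbox 3)))
    (pyIdx b0 0, pyIdx b0 1, pyIdx b0 2, pyIdx b0 3)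
  [r.1, r.2.1 - 50, r.2.2.1, r.2.2.2 - 50]

-- ===== PORT B =====
-- four independent column reductions: min/max over one mapped column each
def max_bbox_alt (bboxes : List (List Int)) : List Int :=
  let minx := (PySem.List.min? (bboxes.map (fun b => pyIdx b 0)) (fun x => x)).getD 0
  let miny := (PySem.List.min? (bboxes.map (fun b => pyIdx b 1)) (fun x => x)).getD 0
  let maxx := (PySem.List.max? (bboxes.map (fun b => pyIdx b 2)) (fun x => x)).getD 0
  let maxy := (PySem.List.max? (bboxes.map (fun b => pyIdx b 3)) (fun x => x)).getD 0
  [minx, miny - 50, maxx, maxy - 50]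

-- ===== PRECONDITION & SPEC =====
-- Pre_ excludes exactly the inputs on which Python A raises IndexError: the empty list and any bbox with fewer than 4 entries.
def Pre_max_bbox (bboxes : List (List Int)) : Prop :=
  bboxes ≠ [] ∧ ∀ b ∈ bboxes, 4 ≤ b.length
instance (bboxes : List (List Int)) : Decidable (Pre_max_bbox bboxes) := by unfold Pre_max_bbox; infer_instance
def pvWitness_max_bbox : List (List Int) := [[0, 1, 10, 11], [-3, 2, 7, 20]]
def Spec_max_bbox (bboxes : List (List Int)) (out : List Int) : Prop := out = max_bbox_alt bboxes
instance (bboxes : List (List Int)) (out : List Int) : Decidable (Spec_max_bbox bboxes out) := by unfold Spec_max_bbox; infer_instance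

-- ===== CLAIM (what is proved, stated in full; the proofs are below) =====
def Claim_equal_max_bbox : Prop := ∀ (bboxes : List (List Int)), Dom_max_bbox bboxes → Pre_max_bbox bboxes → Spec_max_bbox bboxes (max_bbox bboxes)

-- ===== LEMMAS AND PROOFS =====

-- min? over a nonempty Int list is a plain foldl of `min` seeded with the head
lemma min?_cons_eq (m0 : Int) (ys : List Int) :
    PySem.List.min? (m0 :: ys) (fun x => x) = some (ys.foldl min m0) := by
  induction ys generalizing m0 with
  | nil => rfl
  | cons y ys ih =>
    have step : PySem.List.min? (m0 :: y :: ys) (fun x => x)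
        = PySem.List.min? (min m0 y :: ys) (fun x => x) := by
      simp only [PySem.List.min?, List.foldl_cons]
      congr 2
      split_ifs <;> congr 1 <;> omega
    rw [step, ih, List.foldl_cons]

-- max? over a nonempty Int list is a plain foldl of `max` seeded with the head
lemma max?_cons_eq (m0 : Int) (ys : List Int) :
    PySem.List.max? (m0 :: ys) (fun x => x) = some (ys.foldl max m0) := by
  induction ys generalizing m0 with
  | nil => rfl
  | cons y ys ih =>
    have step : PySem.List.max? (m0 :: y :: ys) (fun x => x)
        = PySem.List.max? (max m0 y :: ys) (fun x => x) := by
      simp only [PySem.List.max?, List.foldl_cons]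
      congr 2
      split_ifs <;> congr 1 <;> omega
    rw [step, ih, List.foldl_cons]

-- A's fused four-accumulator fold splits into four independent folds
lemma fold4 (rest : List (List Int)) (a b c d : Int) :
    rest.foldl
      (fun (s : Int × Int × Int × Int) bbox =>
        (min s.1 (pyIdx bbox 0), min s.2.1 (pyIdx bbox 1),
         max s.2.2.1 (pyIdx bbox 2), max s.2.2.2 (pyIdx bbox 3))) (a, b, c, d)
      = (rest.foldl (fun s bb => min s (pyIdx bb 0)) a,
         rest.foldl (fun s bb => min s (pyIdx bb 1)) b,
         rest.foldl (fun s bb => max s (pyIdx bb 2)) c,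
         rest.foldl (fun s bb => max s (pyIdx bb 3)) d) := by
  induction rest generalizing a b c d with
  | nil => rfl
  | cons x xs ih => simp only [List.foldl_cons]; exact ih _ _ _ _

-- ===== VERDICT (by name: the statement is the Claim_ definition above) =====
theorem max_bbox_spec : Claim_equal_max_bbox := by
  intro bboxes _ hpre
  obtain ⟨hne, -⟩ := hpre
  obtain ⟨b0, rest, rfl⟩ : ∃ b0 rest, bboxes = b0 :: rest := by
    cases bboxes with
    | nil => exact absurd rfl hne
    | cons x xs => exact ⟨x, xs, rfl⟩
  show max_bbox (b0 :: rest) = max_bbox_alt (b0 :: rest)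
  unfold max_bbox max_bbox_alt
  rw [PySem.List.slice_from_one]
  simp [fold4, min?_cons_eq, max?_cons_eq, List.foldl_map, PySem.List.pyGet?, PySem.List.pyIdx?]
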